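-- pv_equiv track=rewrite | github.com/pascalaldo/biggr_models | bigg_models/handlers/utils.py | format_gene_reaction_rule
-- ===== SOURCE A (Python) =====
-- def format_gene_reaction_rule(grr):
--     s = grr.replace("(", " ( ").replace(")", " ) ")
--     s = [xs for x in s.split(" ") if (xs := x.strip()) != ""]
--     s = [
--         (
--             x
--             if x in [")", "(", "or", "and", "OR", "AND"]
--             else f"<span class='fw-semibold'>{x}</span>"
--         )
--         for x in s
--     ]
--     res = " "
--     for x in s:
--         if x == ")" or res[-1] in " (":
--             res = f"{res}{x}"
--         else:
--             res = f"{res} {x}"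
--
--     return res.strip()
-- ===== SOURCE B (Python) =====
-- def format_gene_reaction_rule(grr):
--     # single-pass character scanner: parens and spaces delimit tokens directly
--     tokens = []
--     word = ""
--     for ch in grr:
--         if ch == "(" or ch == ")":
--             w = word.strip()
--             if w:
--                 tokens.append(w)
--             word = ""
--             tokens.append(ch)
--         elif ch == " ":
--             w = word.strip()
--             if w:
--                 tokens.append(w)
--             word = ""
--         else:
--             word += ch
--     w = word.strip()
--     if w:
--         tokens.append(w)
--
--     out = ""
--     prev = ""
--     for t in tokens:
--         wrapped = (
--             t
--             if t in ("(", ")", "or", "and", "OR", "AND")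
--             else f"<span class='fw-semibold'>{t}</span>"
--         )
--         if out and prev != "(" and t != ")":
--             out += " "
--         out += wrapped
--         prev = t
--     return out
-- ===== Notes on version B (the rewrite author's own statement) =====
-- stated objective: alternative
-- what changed: A's four-stage pipeline (two global replaces inserting spaces around parens, split-on-space with strip/filter, a wrapping comprehension, then a stateful join loop inspecting res[-1]) is replaced by a single character-level scanner that emits tokens directly (parens and spaces act as delimiters) followed by an emit loop that decides spacing from the raw previous/current token instead of the accumulated string's last character.
import Mathlib
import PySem

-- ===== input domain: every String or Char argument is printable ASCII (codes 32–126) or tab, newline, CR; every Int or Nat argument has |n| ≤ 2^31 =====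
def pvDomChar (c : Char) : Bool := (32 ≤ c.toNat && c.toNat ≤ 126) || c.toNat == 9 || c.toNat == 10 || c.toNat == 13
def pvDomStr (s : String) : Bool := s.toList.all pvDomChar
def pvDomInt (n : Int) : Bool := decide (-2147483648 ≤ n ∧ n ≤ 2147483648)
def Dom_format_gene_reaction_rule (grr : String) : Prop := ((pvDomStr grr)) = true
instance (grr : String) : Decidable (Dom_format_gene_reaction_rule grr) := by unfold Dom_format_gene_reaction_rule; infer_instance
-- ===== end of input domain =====

-- B replaces A's replace/split/wrap/accumulator pipeline by a single character-level
-- scanner that emits tokens and spacing directly ("objective": alternative).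

-- ===== PORT A =====
def format_gene_reaction_rule (grr : String) : String :=
  -- s = grr.replace("(", " ( ").replace(")", " ) ")
  let s1 : List Char :=
    PySem.Chars.replace (PySem.Chars.replace grr.toList ['('] [' ', '(', ' ']) [')'] [' ', ')', ' ']
  -- s = [xs for x in s.split(" ") if (xs := x.strip()) != ""]
  let s2 : List (List Char) := (PySem.Chars.splitOn s1 [' ']).filterMap (fun x =>
    let xs := PySem.Chars.strip x
    if xs ≠ [] then some xs else none)
  -- s = [x if x in [")", "(", "or", "and", "OR", "AND"] else f"<span ...>{x}</span>" for x in s]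
  let s3 : List (List Char) := s2.map (fun x =>
    if x ∈ [[')'], ['('], ['o','r'], ['a','n','d'], ['O','R'], ['A','N','D']] then x
    else "<span class='fw-semibold'>".toList ++ x ++ "</span>".toList)
  -- res = " "; for x in s: ...  (res is never empty, so Python's res[-1] is total here;
  -- ported as pyGet? with a .getD whose default is never used)
  let res : List Char := s3.foldl (fun res x =>
    if x = [')'] ∨ (PySem.List.pyGet? res (-1)).getD ' ' ∈ [' ', '('] then res ++ x
    else res ++ ' ' :: x) [' ']
  String.ofList (PySem.Chars.strip res)

-- ===== PORT B =====
-- wrapped = t if t in ("(", ")", "or", "and", "OR", "AND") else f"<span ...>{t}</span>"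
def fgrWrap (t : List Char) : List Char :=
  if t ∈ [['('], [')'], ['o','r'], ['a','n','d'], ['O','R'], ['A','N','D']] then t
  else "<span class='fw-semibold'>".toList ++ t ++ "</span>".toList

-- w = word.strip(); if w: tokens.append(w)
def fgrFlush (word : List Char) : List (List Char) :=
  let w := PySem.Chars.strip word
  if w = [] then [] else [w]

-- first loop of B: character scanner producing the token list
def fgrTok : List Char → List Char → List (List Char)
  | [], word => fgrFlush word
  | c :: rest, word =>
      if c = '(' ∨ c = ')' then fgrFlush word ++ [c] :: fgrTok rest []
      else if c = ' ' then fgrFlush word ++ fgrTok rest []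
      else fgrTok rest (word ++ [c])

-- second loop of B: emit with spacing decided from the raw previous/current token
def fgrEmit : List (List Char) → List Char → List Char → List Char
  | [], out, _ => out
  | t :: ts, out, prev =>
      fgrEmit ts
        (out ++ (if out ≠ [] ∧ prev ≠ ['('] ∧ t ≠ [')'] then [' '] else []) ++ fgrWrap t) t

def format_gene_reaction_rule_alt (grr : String) : String :=
  String.ofList (fgrEmit (fgrTok grr.toList []) [] [])

-- ===== PRECONDITION & SPEC =====
def Spec_format_gene_reaction_rule (grr : String) (out : String) : Prop := out = format_gene_reaction_rule_alt grr
instance (grr : String) (out : String) : Decidable (Spec_format_gene_reaction_rule grr out) := by unfold Spec_format_gene_reaction_rule; infer_instance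

-- ===== CLAIM (what is proved, stated in full; the proofs are below) =====
def Claim_equal_format_gene_reaction_rule : Prop := ∀ (grr : String), Dom_format_gene_reaction_rule grr → Spec_format_gene_reaction_rule grr (format_gene_reaction_rule grr)

-- ===== LEMMAS AND PROOFS =====

-- The per-character expansion performed by A's two initial replaces.
def pvH (c : Char) : List Char :=
  if c = '(' then [' ', '(', ' '] else if c = ')' then [' ', ')', ' '] else [c]

-- Parentheses occur only as isolated one-character pieces.
def pvIso (p : List Char) : Prop := ('(' ∈ p → p = ['(']) ∧ (')' ∈ p → p = [')'])

-- What holds of every wrapped token.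
def pvGood (t : List Char) : Prop :=
  t ≠ [] ∧ (∀ a ∈ t.head?, PySem.Chars.isspace a = false) ∧
    (∀ b ∈ t.getLast?, PySem.Chars.isspace b = false) ∧ pvIso t

-- The common normal form: tokens joined, no space after "(" and none before ")".
def pvG : List (List Char) → List Char → List Char
  | [], _ => []
  | t :: ws, prev => (if prev = ['('] ∨ t = [')'] then [] else [' ']) ++ t ++ pvG ws t

def pvF : List (List Char) → List Char
  | [] => []
  | t :: ws => t ++ pvG ws t

-- A's token-selection function (strip, keep if nonempty).
def pvSel (p : List Char) : Option (List Char) :=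
  let xs := PySem.Chars.strip p
  if xs ≠ [] then some xs else none

lemma pv_go1 (c : Char) (new : List Char) :
    ∀ (fuel : Nat) (l acc : List Char), l.length ≤ fuel →
      PySem.Chars.replace.go [c] new fuel l acc =
        acc.reverse ++ l.flatMap (fun d => if d = c then new else [d]) := by
  intro fuel
  induction fuel with
  | zero =>
      intro l acc h
      have : l = [] := List.length_eq_zero_iff.mp (Nat.le_zero.mp h)
      subst this
      rw [PySem.Chars.replace.go.eq_def]; simp
  | succ n ih =>
      intro l acc h
      match l with
      | [] => rw [PySem.Chars.replace.go.eq_def]; simp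
      | d :: t =>
          rw [PySem.Chars.replace.go.eq_def]
          simp only [List.isPrefixOf, Bool.and_true, List.length_cons] at *
          by_cases hd : c = d
          · rw [if_pos (by simp [hd])]
            rw [show List.drop ([].length + 1) (d :: t) = t by simp]
            rw [ih t (new.reverse ++ acc) (by omega)]
            simp [hd.symm]
          · rw [if_neg (by simpa using hd)]
            rw [ih t (d :: acc) (by omega)]
            have hdc : ¬ d = c := fun h' => hd h'.symm
            simp [hdc]

lemma pv_replace_one (c : Char) (new s : List Char) :
    PySem.Chars.replace s [c] new = s.flatMap (fun d => if d = c then new else [d]) := by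
  rw [PySem.Chars.replace]
  simp only [List.isEmpty_cons, Bool.false_eq_true, if_false]
  simpa using pv_go1 c new s.length s [] le_rfl

lemma pv_expand (g : List Char) :
    PySem.Chars.replace (PySem.Chars.replace g ['('] [' ', '(', ' ']) [')'] [' ', ')', ' '] =
      g.flatMap pvH := by
  rw [pv_replace_one, pv_replace_one, List.flatMap_assoc]
  apply List.flatMap_congr
  intro x _
  by_cases h1 : x = '('
  · subst h1; simp [pvH]
  · by_cases h2 : x = ')'
    · subst h2; simp [pvH]
    · simp [pvH, h1, h2]

lemma pv_goSplit (c : Char) :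
    ∀ (fuel : Nat) (l cur : List Char) (acc : List (List Char)), l.length ≤ fuel →
      PySem.Chars.splitOn.go [c] fuel l cur acc =
        acc.reverse ++ (List.splitOnP (· == c) l).modifyHead (cur.reverse ++ ·) := by
  intro fuel
  induction fuel with
  | zero =>
      intro l cur acc h
      have : l = [] := List.length_eq_zero_iff.mp (Nat.le_zero.mp h)
      subst this
      rw [PySem.Chars.splitOn.go.eq_def]; simp [List.splitOnP_nil]
  | succ n ih =>
      intro l cur acc h
      match l with
      | [] => rw [PySem.Chars.splitOn.go.eq_def]; simp [List.splitOnP_nil]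
      | d :: t =>
          rw [PySem.Chars.splitOn.go.eq_def]
          simp only [List.isPrefixOf, Bool.and_true, List.length_cons] at *
          by_cases hd : c = d
          · rw [if_pos (by simp [hd])]
            rw [show List.drop ([].length + 1) (d :: t) = t by simp]
            rw [ih t [] (cur.reverse :: acc) (by omega)]
            rw [List.splitOnP_cons]
            rw [if_pos (by simp [hd])]
            obtain ⟨hd2, tl2, heq2⟩ := List.exists_cons_of_ne_nil (List.splitOnP_ne_nil (· == c) t)
            rw [heq2]
            simp [List.modifyHead]
          · rw [if_neg (by simpa using hd)]
            rw [ih t (d :: cur) acc (by omega)]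
            rw [List.splitOnP_cons]
            rw [if_neg (by simpa using fun h' => hd h'.symm)]
            obtain ⟨hd', tl', heq⟩ := List.exists_cons_of_ne_nil (List.splitOnP_ne_nil (· == c) t)
            rw [heq]
            simp [List.modifyHead]

lemma pv_splitOn_single (c : Char) (s : List Char) :
    PySem.Chars.splitOn s [c] = List.splitOnP (· == c) s := by
  rw [PySem.Chars.splitOn, pv_goSplit c (s.length + 1) s [] [] (by omega)]
  obtain ⟨hd, tl, heq⟩ := List.exists_cons_of_ne_nil (List.splitOnP_ne_nil (· == c) s)
  rw [heq]; simp [List.modifyHead]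

lemma pv_pieces (g : List Char) :
    (∀ a ∈ (List.splitOnP (· == ' ') (g.flatMap pvH)).head?, '(' ∉ a ∧ ')' ∉ a) ∧
      (∀ p ∈ List.splitOnP (· == ' ') (g.flatMap pvH), pvIso p) := by
  induction g with
  | nil => simp [List.splitOnP_nil, pvIso]
  | cons c g ih =>
      obtain ⟨ih1, ih2⟩ := ih
      obtain ⟨hd, tl, heq⟩ := List.exists_cons_of_ne_nil (List.splitOnP_ne_nil (· == ' ') (g.flatMap pvH))
      rw [heq] at ih1 ih2
      by_cases h1 : c = '('
      · subst h1
        have : ((('(' :: g).flatMap pvH)) = ' ' :: '(' :: ' ' :: g.flatMap pvH := by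
          simp [pvH]
        rw [this]
        rw [List.splitOnP_cons, if_pos (by simp), List.splitOnP_cons,
          if_neg (by simp), List.splitOnP_cons, if_pos (by simp), heq]
        constructor
        · simp
        · intro p hp
          simp only [List.modifyHead, List.mem_cons] at hp
          rcases hp with rfl | hp
          · exact ⟨fun h => absurd h (by simp), fun h => absurd h (by simp)⟩
          · rcases hp with rfl | hp
            · exact ⟨fun _ => rfl, fun h => absurd h (by simp)⟩
            · exact ih2 p (by simp [hp])
      · by_cases h2 : c = ')'
        · subst h2
          have : (((')' :: g).flatMap pvH)) = ' ' :: ')' :: ' ' :: g.flatMap pvH := by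
            simp [pvH]
          rw [this]
          rw [List.splitOnP_cons, if_pos (by simp), List.splitOnP_cons,
            if_neg (by simp), List.splitOnP_cons, if_pos (by simp), heq]
          constructor
          · simp
          · intro p hp
            simp only [List.modifyHead, List.mem_cons] at hp
            rcases hp with rfl | hp
            · exact ⟨fun h => absurd h (by simp), fun h => absurd h (by simp)⟩
            · rcases hp with rfl | hp
              · exact ⟨fun h => absurd h (by simp), fun _ => rfl⟩
              · exact ih2 p (by simp [hp])
        · by_cases h3 : c = ' '
          · subst h3
            have : (((' ' :: g).flatMap pvH)) = ' ' :: g.flatMap pvH := by simp [pvH]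
            rw [this, List.splitOnP_cons, if_pos (by simp), heq]
            constructor
            · simp
            · intro p hp
              simp only [List.mem_cons] at hp
              rcases hp with rfl | hp
              · exact ⟨fun h => absurd h (by simp), fun h => absurd h (by simp)⟩
              · exact ih2 p (by simp [hp])
          · have : (((c :: g).flatMap pvH)) = c :: g.flatMap pvH := by simp [pvH, h1, h2]
            rw [this, List.splitOnP_cons, if_neg (by simp [h3]), heq]
            have hhd := ih1 hd (by simp)
            constructor
            · intro a ha
              simp only [List.modifyHead, List.head?_cons, Option.mem_some_iff] at ha
              subst ha
              constructor
              · simp only [List.mem_cons]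
                rintro (rfl | h)
                · exact h1 rfl
                · exact hhd.1 h
              · simp only [List.mem_cons]
                rintro (rfl | h)
                · exact h2 rfl
                · exact hhd.2 h
            · intro p hp
              simp only [List.modifyHead, List.mem_cons] at hp
              rcases hp with rfl | hp
              · constructor
                · intro hmem
                  rcases List.mem_cons.mp hmem with rfl | hmem
                  · exact absurd rfl h1
                  · exact absurd hmem hhd.1
                · intro hmem
                  rcases List.mem_cons.mp hmem with rfl | hmem
                  · exact absurd rfl h2
                  · exact absurd hmem hhd.2
              · exact ih2 p (by simp [hp])

lemma pv_strip_mem (l : List Char) (a : Char) (h : a ∈ PySem.Chars.strip l) : a ∈ l := by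
  rw [PySem.Chars.strip] at h
  rw [PySem.Chars.rstrip] at h
  rw [PySem.Chars.lstrip] at h
  have h1 : a ∈ List.dropWhile PySem.Chars.isspace (List.dropWhile PySem.Chars.isspace l).reverse :=
    List.mem_reverse.mp h
  have h2 : a ∈ (List.dropWhile PySem.Chars.isspace l).reverse := (List.dropWhile_sublist _).mem h1
  exact (List.dropWhile_sublist _).mem (List.mem_reverse.mp h2)

lemma pv_rstrip_prefix (v : List Char) : PySem.Chars.rstrip v <+: v := by
  rw [PySem.Chars.rstrip]
  have hs : List.dropWhile PySem.Chars.isspace v.reverse <:+ v.reverse := List.dropWhile_suffix _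
  obtain ⟨t, ht⟩ := hs
  exact ⟨t.reverse, by rw [← List.reverse_append, ht, List.reverse_reverse]⟩

lemma pv_strip_head (l : List Char) :
    ∀ a ∈ (PySem.Chars.strip l).head?, PySem.Chars.isspace a = false := by
  intro a ha
  rw [PySem.Chars.strip] at ha
  set v := PySem.Chars.lstrip l with hv
  have hpre := pv_rstrip_prefix v
  obtain ⟨w, hw⟩ := hpre
  have hne : PySem.Chars.rstrip v ≠ [] := by
    intro hnil; rw [hnil] at ha; simp at ha
  have hvh : v.head? = (PySem.Chars.rstrip v).head? := by
    conv_lhs => rw [← hw]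
    rw [List.head?_append_of_ne_nil _ hne]
  rw [← hvh] at ha
  rw [hv, PySem.Chars.lstrip] at ha
  have := List.head?_dropWhile_not PySem.Chars.isspace l
  rw [Option.mem_def.mp ha] at this
  exact this

lemma pv_strip_last (l : List Char) :
    ∀ b ∈ (PySem.Chars.strip l).getLast?, PySem.Chars.isspace b = false := by
  intro b hb
  rw [PySem.Chars.strip, PySem.Chars.rstrip, List.getLast?_reverse] at hb
  have := List.head?_dropWhile_not PySem.Chars.isspace (PySem.Chars.lstrip l).reverse
  rw [Option.mem_def.mp hb] at this
  exact this

-- wrapped tokens of A are "good" (nonempty, no whitespace at ends, isolated parens)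
lemma pv_tokens_good (g : List Char) :
    ∀ t ∈ (((PySem.Chars.splitOn
        (PySem.Chars.replace (PySem.Chars.replace g ['('] [' ', '(', ' ']) [')'] [' ', ')', ' '])
        [' ']).filterMap (fun x =>
          let xs := PySem.Chars.strip x
          if xs ≠ [] then some xs else none)).map (fun x =>
            if x ∈ [[')'], ['('], ['o','r'], ['a','n','d'], ['O','R'], ['A','N','D']] then x
            else "<span class='fw-semibold'>".toList ++ x ++ "</span>".toList)), pvGood t := by
  intro t ht
  rw [List.mem_map] at ht
  obtain ⟨x, hx, rfl⟩ := ht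
  rw [List.mem_filterMap] at hx
  obtain ⟨p, hp, hxe⟩ := hx
  simp only [ne_eq, ite_not] at hxe
  by_cases hne : PySem.Chars.strip p = []
  · rw [if_pos hne] at hxe; exact absurd hxe (by simp)
  · rw [if_neg hne] at hxe
    have hx : x = PySem.Chars.strip p := (Option.some_inj.mp hxe).symm
    subst hx
    rw [pv_expand, pv_splitOn_single] at hp
    have hiso_p : pvIso p := (pv_pieces g).2 p hp
    have hxne : PySem.Chars.strip p ≠ [] := hne
    have hhead := pv_strip_head p
    have hlast := pv_strip_last p
    have hiso : pvIso (PySem.Chars.strip p) := by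
      constructor
      · intro hmem
        have := hiso_p.1 (pv_strip_mem p _ hmem)
        subst this
        rfl
      · intro hmem
        have := hiso_p.2 (pv_strip_mem p _ hmem)
        subst this
        rfl
    set y := PySem.Chars.strip p with hy
    by_cases hk : y ∈ [[')'], ['('], ['o','r'], ['a','n','d'], ['O','R'], ['A','N','D']]
    · rw [if_pos hk]
      exact ⟨hxne, hhead, hlast, hiso⟩
    · rw [if_neg hk]
      refine ⟨by simp, ?_, ?_, ?_, ?_⟩
      · intro a ha
        rw [List.append_assoc, List.head?_append_of_ne_nil _ (by simp)] at ha
        have : a = '<' := by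
          have : ("<span class='fw-semibold'>".toList).head? = some '<' := by decide
          rw [this] at ha; exact Option.some_inj.mp (Option.mem_def.mp ha) |>.symm
        subst this; decide
      · intro b hb
        rw [List.getLast?_append_of_ne_nil _ (by decide : ("</span>".toList : List Char) ≠ [])] at hb
        have : b = '>' := by
          have : ("</span>".toList).getLast? = some '>' := by decide
          rw [this] at hb; exact Option.some_inj.mp (Option.mem_def.mp hb) |>.symm
        subst this; decide
      · intro hmem
        exfalso
        rcases List.mem_append.mp hmem with hmem | hmem
        · rcases List.mem_append.mp hmem with hmem | hmem
          · exact absurd hmem (by decide)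
          · have := hiso.1 hmem
            exact hk (by rw [this]; simp)
        · exact absurd hmem (by decide)
      · intro hmem
        exfalso
        rcases List.mem_append.mp hmem with hmem | hmem
        · rcases List.mem_append.mp hmem with hmem | hmem
          · exact absurd hmem (by decide)
          · have := hiso.2 hmem
            exact hk (by rw [this]; simp)
        · exact absurd hmem (by decide)

lemma pv_pyGet_neg_one (xs : List Char) (h : xs ≠ []) :
    PySem.List.pyGet? xs (-1) = xs.getLast? := by
  simp [PySem.List.pyGet?, PySem.List.pyIdx?]
  rw [if_pos (by simpa using List.length_pos_iff.mpr h)]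
  simp [List.getLast?_eq_getElem?]

lemma pv_loopA (ws : List (List Char)) :
    ∀ (prev acc : List Char), pvGood prev → (∀ t ∈ ws, pvGood t) →
      ws.foldl (fun res x =>
          if x = [')'] ∨ (PySem.List.pyGet? res (-1)).getD ' ' ∈ [' ', '('] then res ++ x
          else res ++ ' ' :: x) (acc ++ prev) = acc ++ prev ++ pvG ws prev := by
  induction ws with
  | nil => intro prev acc _ _; simp [pvG]
  | cons t ws ih =>
      intro prev acc hprev hws
      obtain ⟨hpne, hphead, hplast, hpiso⟩ := hprev
      obtain ⟨b, hb⟩ : ∃ b, prev.getLast? = some b := by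
        cases hpl : prev.getLast? with
        | none => exact absurd (List.getLast?_eq_none_iff.mp hpl) hpne
        | some b => exact ⟨b, rfl⟩
      have hlast_app : (acc ++ prev).getLast? = some b := by
        rw [List.getLast?_append_of_ne_nil _ hpne, hb]
      have hget : (PySem.List.pyGet? (acc ++ prev) (-1)).getD ' ' = b := by
        rw [pv_pyGet_neg_one _ (by simp [hpne]), hlast_app]; rfl
      have hbspace : PySem.Chars.isspace b = false := hplast b hb
      have hbne_sp : b ≠ ' ' := fun h => by subst h; exact absurd hbspace (by decide)
      have hbpar : b = '(' ↔ prev = ['('] := by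
        constructor
        · intro h; subst h
          exact hpiso.1 (List.mem_of_getLast? hb)
        · intro h; subst h
          exact (Option.some_inj.mp (by simpa using hb)).symm
      have hcond : ((t = [')'] ∨ (PySem.List.pyGet? (acc ++ prev) (-1)).getD ' ' ∈ [' ', '('])) ↔ (prev = ['('] ∨ t = [')']) := by
        rw [hget]
        simp only [List.mem_cons, List.not_mem_nil, or_false]
        constructor
        · rintro (h | h | h)
          · exact Or.inr h
          · exact absurd h hbne_sp
          · exact Or.inl (hbpar.mp h)
        · rintro (h | h)
          · exact Or.inr (Or.inr (hbpar.mpr h))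
          · exact Or.inl h
      rw [List.foldl_cons]
      by_cases hc : prev = ['('] ∨ t = [')']
      · rw [if_pos (hcond.mpr hc)]
        have := ih t (acc ++ prev) (hws t (by simp)) (fun u hu => hws u (by simp [hu]))
        rw [this]
        simp [pvG, if_pos hc, List.append_assoc]
      · rw [if_neg (fun h => hc (hcond.mp h))]
        have := ih t (acc ++ prev ++ [' ']) (hws t (by simp)) (fun u hu => hws u (by simp [hu]))
        rw [show (acc ++ prev) ++ ' ' :: t = (acc ++ prev ++ [' ']) ++ t by simp] at *
        rw [this]
        simp [pvG, if_neg hc, List.append_assoc]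

lemma pv_F_head (ws : List (List Char)) (h : ∀ t ∈ ws, pvGood t) :
    ∀ a ∈ (pvF ws).head?, PySem.Chars.isspace a = false := by
  cases ws with
  | nil => simp [pvF]
  | cons t ws =>
      intro a ha
      obtain ⟨htne, hthead, _, _⟩ := h t (by simp)
      rw [pvF, List.head?_append_of_ne_nil _ htne] at ha
      exact hthead a ha

lemma pv_G_last (ws : List (List Char)) :
    ∀ (prev : List Char), pvGood prev → (∀ t ∈ ws, pvGood t) →
      ∀ b ∈ (prev ++ pvG ws prev).getLast?, PySem.Chars.isspace b = false := by
  induction ws with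
  | nil =>
      intro prev hprev _ b hb
      rw [pvG, List.append_nil] at hb
      exact hprev.2.2.1 b hb
  | cons t ws ih =>
      intro prev hprev hws b hb
      rw [pvG] at hb
      rw [show prev ++ ((if prev = ['('] ∨ t = [')'] then [] else [' ']) ++ t ++ pvG ws t)
          = (prev ++ (if prev = ['('] ∨ t = [')'] then [] else [' '])) ++ (t ++ pvG ws t) by
        simp [List.append_assoc]] at hb
      have htg : pvGood t := hws t (by simp)
      have hne : t ++ pvG ws t ≠ [] := by
        intro hnil
        exact htg.1 (List.append_eq_nil_iff.mp hnil).1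
      rw [List.getLast?_append_of_ne_nil _ hne] at hb
      exact ih t htg (fun u hu => hws u (by simp [hu])) b hb

lemma pv_F_last (ws : List (List Char)) (h : ∀ t ∈ ws, pvGood t) :
    ∀ b ∈ (pvF ws).getLast?, PySem.Chars.isspace b = false := by
  cases ws with
  | nil => simp [pvF]
  | cons t ws =>
      rw [pvF]
      exact pv_G_last ws t (h t (by simp)) (fun u hu => h u (by simp [hu]))

lemma pv_lstrip_eq_self (l : List Char) (h : ∀ a ∈ l.head?, PySem.Chars.isspace a = false) :
    PySem.Chars.lstrip l = l := by
  rw [PySem.Chars.lstrip]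
  cases l with
  | nil => rfl
  | cons c t => rw [List.dropWhile_cons_of_neg (by simp [h c (by simp)])]

lemma pv_rstrip_eq_self (l : List Char) (h : ∀ b ∈ l.getLast?, PySem.Chars.isspace b = false) :
    PySem.Chars.rstrip l = l := by
  rw [PySem.Chars.rstrip]
  cases hrev : l.reverse with
  | nil => simpa using congrArg List.reverse hrev
  | cons c t =>
      have hc : l.getLast? = some c := by
        rw [← List.head?_reverse, hrev]; rfl
      rw [List.dropWhile_cons_of_neg (by simp [h c hc])]
      rw [← hrev, List.reverse_reverse]

-- A's whole function equals the normal form pvF of its wrapped token list.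
lemma pv_Aside (ws : List (List Char)) (h : ∀ t ∈ ws, pvGood t) :
    PySem.Chars.strip (ws.foldl (fun res x =>
        if x = [')'] ∨ (PySem.List.pyGet? res (-1)).getD ' ' ∈ [' ', '('] then res ++ x
        else res ++ ' ' :: x) [' ']) = pvF ws := by
  cases ws with
  | nil => decide
  | cons t ws =>
      rw [List.foldl_cons]
      have ht : pvGood t := h t (by simp)
      rw [if_pos (by rw [pv_pyGet_neg_one [' '] (by simp)]; simp)]
      rw [show ([' '] ++ t) = ([' '] ++ t) from rfl]
      rw [pv_loopA ws t [' '] ht (fun u hu => h u (by simp [hu]))]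
      have hF : [' '] ++ t ++ pvG ws t = ' ' :: pvF (t :: ws) := by simp [pvF]
      rw [hF]
      rw [PySem.Chars.strip]
      have h1 : PySem.Chars.lstrip (' ' :: pvF (t :: ws)) = pvF (t :: ws) := by
        rw [PySem.Chars.lstrip, List.dropWhile_cons_of_pos (by decide)]
        have := pv_lstrip_eq_self (pvF (t :: ws)) (pv_F_head (t :: ws) h)
        rwa [PySem.Chars.lstrip] at this
      rw [h1]
      exact pv_rstrip_eq_self _ (pv_F_last (t :: ws) h)

-- ===== B-side lemmas =====

-- B's scanner computes exactly A's token list (with the pending word prefixed to the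
-- first remaining piece).
lemma pv_modifyHead_nil (l : List (List Char)) :
    l.modifyHead (fun x => [] ++ x) = l := by
  cases l <;> simp

lemma pv_sel_cons (w : List Char) (l : List (List Char)) :
    List.filterMap pvSel (w :: l) = fgrFlush w ++ List.filterMap pvSel l := by
  rw [List.filterMap_cons]
  by_cases h : PySem.Chars.strip w = []
  · have hs : pvSel w = none := by simp [pvSel, h]
    rw [hs]
    simp [fgrFlush, h]
  · have hs : pvSel w = some (PySem.Chars.strip w) := by simp [pvSel, h]
    rw [hs]
    simp [fgrFlush, h]

lemma pv_tok_eq : ∀ (g word : List Char),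
    fgrTok g word =
      ((List.splitOnP (· == ' ') (g.flatMap pvH)).modifyHead (fun x => word ++ x)).filterMap pvSel := by
  intro g
  induction g with
  | nil =>
      intro word
      rw [fgrTok]
      simp only [List.flatMap_nil, List.splitOnP_nil, List.modifyHead, List.append_nil]
      rw [pv_sel_cons]
      simp
  | cons c g ih =>
      intro word
      obtain ⟨hd, tl, heq⟩ := List.exists_cons_of_ne_nil (List.splitOnP_ne_nil (· == ' ') (g.flatMap pvH))
      by_cases h1 : c = '(' ∨ c = ')'
      · have hcsp : ¬ (c == ' ') = true := by rcases h1 with h1 | h1 <;> simp [h1]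
        have hsp : List.splitOnP (· == ' ') ((c :: g).flatMap pvH) = [] :: [c] :: hd :: tl := by
          have hexp : (c :: g).flatMap pvH = ' ' :: c :: ' ' :: g.flatMap pvH := by
            rcases h1 with h1 | h1 <;> (subst h1; simp [pvH])
          rw [hexp, List.splitOnP_cons, if_pos (by simp), List.splitOnP_cons, if_neg hcsp,
            List.splitOnP_cons, if_pos (by simp), heq]
          simp [List.modifyHead]
        rw [fgrTok, if_pos h1, hsp]
        have hmod : List.modifyHead (fun x => word ++ x) ([] :: [c] :: hd :: tl)
            = word :: [c] :: hd :: tl := by simp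
        rw [hmod, pv_sel_cons, pv_sel_cons]
        have hfc : fgrFlush [c] = [[c]] := by
          rcases h1 with h1 | h1 <;> (subst h1; decide)
        rw [hfc, ih [], heq, pv_modifyHead_nil]
        simp
      · by_cases h2 : c = ' '
        · subst h2
          have hsp : List.splitOnP (· == ' ') ((' ' :: g).flatMap pvH) = [] :: hd :: tl := by
            have hexp : ((' ' :: g).flatMap pvH) = ' ' :: g.flatMap pvH := by simp [pvH]
            rw [hexp, List.splitOnP_cons, if_pos (by simp), heq]
          rw [fgrTok, if_neg h1, if_pos rfl, hsp]
          have hmod : List.modifyHead (fun x => word ++ x) ([] :: hd :: tl)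
              = word :: hd :: tl := by simp
          rw [hmod, pv_sel_cons, ih [], heq, pv_modifyHead_nil]
        · have hc1 : ¬ c = '(' := fun h => h1 (Or.inl h)
          have hc2 : ¬ c = ')' := fun h => h1 (Or.inr h)
          have hsp : List.splitOnP (· == ' ') ((c :: g).flatMap pvH) = (c :: hd) :: tl := by
            have hexp : ((c :: g).flatMap pvH) = c :: g.flatMap pvH := by simp [pvH, hc1, hc2]
            rw [hexp, List.splitOnP_cons, if_neg (by simp [h2]), heq]
            simp [List.modifyHead]
          rw [fgrTok, if_neg h1, if_neg h2, ih (word ++ [c]), hsp, heq]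
          simp [List.modifyHead, List.append_assoc]

lemma pv_tok_top (g : List Char) :
    fgrTok g [] =
      (List.splitOnP (· == ' ') (g.flatMap pvH)).filterMap pvSel := by
  rw [pv_tok_eq, pv_modifyHead_nil]

-- fgrWrap is the identity exactly on "(" / ")" (a span or keyword is never a paren).
lemma pv_wrap_par (t : List Char) :
    (fgrWrap t = ['('] ↔ t = ['(']) ∧ (fgrWrap t = [')'] ↔ t = [')']) ∧ fgrWrap t ≠ [] := by
  rw [fgrWrap]
  by_cases hk : t ∈ [['('], [')'], ['o','r'], ['a','n','d'], ['O','R'], ['A','N','D']]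
  · rw [if_pos hk]
    refine ⟨Iff.rfl, Iff.rfl, ?_⟩
    simp only [List.mem_cons, List.not_mem_nil, or_false] at hk
    rcases hk with rfl | rfl | rfl | rfl | rfl | rfl <;> simp
  · rw [if_neg hk]
    have hlen : ("<span class='fw-semibold'>".toList ++ t ++ "</span>".toList).length
        = 26 + t.length + 7 := by simp; omega
    have hno : ∀ u : List Char, u.length = 1 →
        "<span class='fw-semibold'>".toList ++ t ++ "</span>".toList ≠ u := by
      intro u hu h
      have := congrArg List.length h
      rw [hlen, hu] at this
      omega
    refine ⟨Iff.intro (fun h => absurd h (hno ['('] rfl)) (fun h => (hk (by rw [h]; simp)).elim),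
      Iff.intro (fun h => absurd h (hno [')'] rfl)) (fun h => (hk (by rw [h]; simp)).elim), ?_⟩
    intro h
    have := congrArg List.length h
    have h0 : (List.length ([] : List Char)) = 0 := rfl
    rw [hlen, h0] at this
    omega

-- the two keyword lists (A's and B's) select the same tokens
lemma pv_wrap_eq (x : List Char) :
    (if x ∈ [[')'], ['('], ['o','r'], ['a','n','d'], ['O','R'], ['A','N','D']] then x
     else "<span class='fw-semibold'>".toList ++ x ++ "</span>".toList) = fgrWrap x := by
  rw [fgrWrap]
  have h : x ∈ [[')'], ['('], ['o','r'], ['a','n','d'], ['O','R'], ['A','N','D']] ↔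
      x ∈ [['('], [')'], ['o','r'], ['a','n','d'], ['O','R'], ['A','N','D']] := by
    simp only [List.mem_cons, List.not_mem_nil, or_false]
    tauto
  by_cases hx : x ∈ [[')'], ['('], ['o','r'], ['a','n','d'], ['O','R'], ['A','N','D']]
  · rw [if_pos hx, if_pos (h.mp hx)]
  · rw [if_neg hx, if_neg (fun hh => hx (h.mpr hh))]

lemma pv_emit_go (ts : List (List Char)) :
    ∀ (out prev : List Char), out ≠ [] →
      fgrEmit ts out prev = out ++ pvG (ts.map fgrWrap) (fgrWrap prev) := by
  induction ts with
  | nil => intro out prev _; simp [fgrEmit, pvG]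
  | cons t ts ih =>
      intro out prev hout
      rw [fgrEmit]
      have hsp : (if out ≠ [] ∧ prev ≠ ['('] ∧ t ≠ [')'] then [' '] else ([] : List Char)) =
          if prev ≠ ['('] ∧ t ≠ [')'] then [' '] else [] := by
        simp [hout]
      rw [hsp]
      rw [ih _ t (by simp [hout])]
      have hcond : (fgrWrap prev = ['('] ∨ fgrWrap t = [')']) ↔ (prev = ['('] ∨ t = [')']) :=
        or_congr (pv_wrap_par prev).1 (pv_wrap_par t).2.1
      rw [List.map_cons, pvG]
      by_cases hc : prev = ['('] ∨ t = [')']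
      · rw [if_pos (hcond.mpr hc), if_neg (by tauto)]
        simp [List.append_assoc]
      · rw [if_neg (fun h => hc (hcond.mp h)), if_pos (by tauto)]
        simp [List.append_assoc]

lemma pv_emit_top (ts : List (List Char)) :
    fgrEmit ts [] [] = pvF (ts.map fgrWrap) := by
  cases ts with
  | nil => rfl
  | cons t ts =>
      rw [fgrEmit]
      simp only [ne_eq, not_true_eq_false, false_and, if_false, List.nil_append]
      rw [pv_emit_go ts (fgrWrap t) t (pv_wrap_par t).2.2]
      rw [List.map_cons, pvF]

-- ===== VERDICT (by name: the statement is the Claim_ definition above) =====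
theorem format_gene_reaction_rule_spec : Claim_equal_format_gene_reaction_rule := by
  intro grr _
  unfold Spec_format_gene_reaction_rule
  simp only [format_gene_reaction_rule, format_gene_reaction_rule_alt]
  rw [pv_Aside _ (pv_tokens_good grr.toList)]
  rw [pv_emit_top, pv_tok_top, pv_expand, pv_splitOn_single]
  exact congrArg String.ofList (congrArg pvF (List.map_congr_left (fun x _ => pv_wrap_eq x)))
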